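-- pv_equiv track=rewrite | github.com/tac-tics/ploverize | create_outlines.py | get_final
-- ===== SOURCE A (Python) =====
-- VOWELS = [
--     "AA", # vowel
--     "AE", # vowel
--     "AH", # vowel
--     "AO", # vowel
--     "AW", # vowel
--     "AY", # vowel
--     "EH", # vowel
--     "ER", # vowel
--     "EY", # vowel
--     "IH", # vowel
--     "IY", # vowel
--     "OW", # vowel
--     "OY", # vowel
--     "UH", # vowel
--     "UW", # vowel
-- ]
--
-- def is_vowel(sound):
--     return any(sound.startswith(vowel) for vowel in VOWELS)
--
-- def get_final(pronunciation):
--     result = []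
--     at_final = False
--     for sound in pronunciation:
--         if at_final and not is_vowel(sound):
--             result.append(sound)
--         if is_vowel(sound):
--             at_final = True
--     return result
-- ===== SOURCE B (Python) =====
-- VOWELS = [
--     "AA", "AE", "AH", "AO", "AW", "AY", "EH", "ER",
--     "EY", "IH", "IY", "OW", "OY", "UH", "UW",
-- ]
--
-- def is_vowel(sound):
--     return any(sound.startswith(vowel) for vowel in VOWELS)
--
-- def get_final(pronunciation):
--     # Walk the list BACKWARDS, collecting consonants (in reverse order) into acc.
--     # At each vowel, snapshot the current length of acc: it is the number of
--     # consonants strictly after that vowel, so the last snapshot taken belongs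
--     # to the EARLIEST vowel.  The answer is that prefix of acc, re-reversed.
--     acc = []
--     cut = None
--     for sound in reversed(pronunciation):
--         if is_vowel(sound):
--             cut = len(acc)
--         else:
--             acc.append(sound)
--     if cut is None:
--         return []
--     return list(reversed(acc[:cut]))
-- ===== Notes on version B (the rewrite author's own statement) =====
-- stated objective: alternative
-- what changed: Replaced A's forward flag-driven pass by a backwards traversal that collects consonants in reverse order and snapshots a cut length at each vowel; the final snapshot (the earliest vowel) selects the prefix that, re-reversed, is the answer.
import Mathlib
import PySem

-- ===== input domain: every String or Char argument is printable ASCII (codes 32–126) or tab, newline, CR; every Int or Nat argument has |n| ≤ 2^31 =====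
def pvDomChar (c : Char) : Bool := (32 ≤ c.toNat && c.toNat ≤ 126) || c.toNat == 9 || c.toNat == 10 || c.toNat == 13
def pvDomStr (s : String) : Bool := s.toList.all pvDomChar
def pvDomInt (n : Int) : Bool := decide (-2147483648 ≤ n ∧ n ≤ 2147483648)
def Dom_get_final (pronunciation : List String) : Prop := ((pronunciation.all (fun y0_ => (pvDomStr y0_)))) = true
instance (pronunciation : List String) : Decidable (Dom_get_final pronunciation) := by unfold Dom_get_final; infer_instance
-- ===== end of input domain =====

-- B replaces A's forward flag-driven pass by a backwards traversal collecting consonants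
-- in reverse order, snapshotting a cut length at each vowel (alternative, same cost).

-- ===== PORT A =====
def pvVowels : List String :=
  ["AA", "AE", "AH", "AO", "AW", "AY", "EH", "ER",
   "EY", "IH", "IY", "OW", "OY", "UH", "UW"]

def pv_is_vowel (sound : String) : Bool :=
  pvVowels.any (fun v => PySem.Str.startswith sound v)

def pvStepA (st : List String × Bool) (sound : String) : List String × Bool :=
  let st := if st.2 && !pv_is_vowel sound then (st.1 ++ [sound], st.2) else st
  if pv_is_vowel sound then (st.1, true) else st

def get_final (pronunciation : List String) : List String :=
  (pronunciation.foldl pvStepA ([], false)).1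

-- ===== PORT B =====
-- state = (acc, cut); the loop over reversed(pronunciation) is a foldl over .reverse
def pvStepB (st : List String × Option Nat) (sound : String) :
    List String × Option Nat :=
  if pv_is_vowel sound then (st.1, some st.1.length) else (st.1 ++ [sound], st.2)

-- acc[:cut] reversed = ((acc.take cut).reverse)
def get_final_alt (pronunciation : List String) : List String :=
  let st := pronunciation.reverse.foldl pvStepB ([], none)
  match st.2 with
  | none => []
  | some cut => (st.1.take cut).reverse

-- ===== PRECONDITION & SPEC =====
def Spec_get_final (pronunciation : List String) (out : List String) : Prop := out = get_final_alt pronunciation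
instance (pronunciation : List String) (out : List String) : Decidable (Spec_get_final pronunciation out) := by unfold Spec_get_final; infer_instance

-- ===== CLAIM (what is proved, stated in full; the proofs are below) =====
def Claim_equal_get_final : Prop := ∀ (pronunciation : List String), Dom_get_final pronunciation → Spec_get_final pronunciation (get_final pronunciation)

-- ===== LEMMAS AND PROOFS =====

-- once A's flag is set, the loop appends exactly the non-vowels of the rest
theorem pv_foldl_true (l : List String) (acc : List String) :
    l.foldl pvStepA (acc, true) = (acc ++ l.filter (fun s => !pv_is_vowel s), true) := by
  induction l generalizing acc with
  | nil => simp
  | cons h t ih =>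
    by_cases hv : pv_is_vowel h = true <;>
      simp [pvStepA, hv, ih]

-- B's backwards fold, read as a foldr: acc accumulates the non-vowels in reverse
-- order, cut is the snapshot length taken at the first vowel
theorem pv_foldr_B (l : List String) :
    l.foldr (fun x st => pvStepB st x) ([], none) =
      ((l.filter (fun s => !pv_is_vowel s)).reverse,
       match l.findIdx? (fun s => pv_is_vowel s) with
       | none => none
       | some i => some ((l.drop (i + 1)).filter (fun s => !pv_is_vowel s)).length) := by
  induction l with
  | nil => rfl
  | cons h t ih =>
    rw [List.foldr_cons, ih]
    by_cases hv : pv_is_vowel h = true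
    · simp [pvStepB, hv, List.findIdx?_cons]
    · simp only [pvStepB, hv, Bool.false_eq_true, if_false, List.findIdx?_cons,
        List.filter_cons, Bool.not_false, if_true, List.reverse_cons]
      cases hfi : t.findIdx? (fun s => pv_is_vowel s) with
      | none => simp
      | some i => simp [List.drop_succ_cons]

-- B in closed form: filter the tail after the first vowel
theorem pv_alt_closed (l : List String) :
    get_final_alt l =
      match l.findIdx? (fun s => pv_is_vowel s) with
      | none => []
      | some i => (l.drop (i + 1)).filter (fun s => !pv_is_vowel s) := by
  unfold get_final_alt
  rw [List.foldl_reverse, pv_foldr_B]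
  cases hfi : l.findIdx? (fun s => pv_is_vowel s) with
  | none => rfl
  | some i =>
    simp only
    have hsplit : l.filter (fun s => !pv_is_vowel s) =
        (l.take (i + 1)).filter (fun s => !pv_is_vowel s) ++
        (l.drop (i + 1)).filter (fun s => !pv_is_vowel s) := by
      rw [← List.filter_append, List.take_append_drop]
    rw [hsplit, List.reverse_append]
    rw [List.take_left' (by simp)]
    simp

theorem get_final_eq_alt (pronunciation : List String) :
    get_final pronunciation = get_final_alt pronunciation := by
  rw [pv_alt_closed]
  induction pronunciation with
  | nil => rfl
  | cons h t ih =>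
    by_cases hv : pv_is_vowel h = true
    · simp only [get_final, List.foldl_cons, pvStepA, hv, Bool.and_false,
        Bool.not_true, List.findIdx?_cons, if_true]
      simp [pv_foldl_true]
    · have hA : get_final (h :: t) = get_final t := by
        simp [get_final, pvStepA, hv]
      rw [hA, ih]
      simp only [List.findIdx?_cons, hv, Bool.false_eq_true, if_false]
      cases hfi : t.findIdx? (fun s => pv_is_vowel s) with
      | none => simp
      | some i => simp [List.drop_succ_cons]

-- ===== VERDICT (by name: the statement is the Claim_ definition above) =====
theorem get_final_spec : Claim_equal_get_final := by
  intro p _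
  exact get_final_eq_alt p
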